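-- pv_equiv track=rewrite | github.com/dariomarras84-lang/TICKER-SCAN | app/config/app/playbook.py | _grade_news
-- ===== SOURCE A (Python) =====
-- from typing import Dict, Any, List, Optional
--
-- def _grade_news(headlines: List[str], tags: Dict[str, List[str]]) -> Dict[str, str]:
--     txt = " ".join((headlines or [])).lower()
--     for t in tags.get("C", []):
--         if t in txt: return {"grade": "C", "hit": t}
--     for t in tags.get("B", []):
--         if t in txt: return {"grade": "B", "hit": t}
--     for t in tags.get("A", []):
--         if t in txt: return {"grade": "A", "hit": t}
--     for t in tags.get("A_plus", []):
--         if t in txt: return {"grade": "A+", "hit": t}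
--     return {"grade": "A+", "hit": "no news"} if not headlines else {"grade": "A", "hit": "neutral"}
-- ===== SOURCE B (Python) =====
-- from typing import Dict, List
--
-- _PRIORITY = (("C", "C"), ("B", "B"), ("A", "A"), ("A_plus", "A+"))
--
-- def _grade_news(headlines: List[str], tags: Dict[str, List[str]]) -> Dict[str, str]:
--     # Text-driven scan: walk the text once, position by position; at each position
--     # take the first (= highest-priority) tag that starts there, and keep the
--     # candidate with the smallest priority rank seen over the whole text.
--     txt = " ".join(headlines or []).lower()
--     candidates = [(g, t) for key, g in _PRIORITY for t in tags.get(key, [])]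
--     best = None  # (rank, grade, tag)
--     for i in range(len(txt) + 1):
--         for r, (g, t) in enumerate(candidates):
--             if txt.startswith(t, i):
--                 if best is None or r < best[0]:
--                     best = (r, g, t)
--                 break
--     if best is not None:
--         return {"grade": best[1], "hit": best[2]}
--     return {"grade": "A+", "hit": "no news"} if not headlines else {"grade": "A", "hit": "neutral"}
-- ===== Notes on version B (the rewrite author's own statement) =====
-- stated objective: alternative
-- what changed: A scans the tags group by group testing each with a full substring search over the text; B is text-driven: one left-to-right walk over the text positions, at each position a prefix test finds the first tag starting there, and a min-rank accumulator keeps the highest-priority match over the whole text.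
import Mathlib
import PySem

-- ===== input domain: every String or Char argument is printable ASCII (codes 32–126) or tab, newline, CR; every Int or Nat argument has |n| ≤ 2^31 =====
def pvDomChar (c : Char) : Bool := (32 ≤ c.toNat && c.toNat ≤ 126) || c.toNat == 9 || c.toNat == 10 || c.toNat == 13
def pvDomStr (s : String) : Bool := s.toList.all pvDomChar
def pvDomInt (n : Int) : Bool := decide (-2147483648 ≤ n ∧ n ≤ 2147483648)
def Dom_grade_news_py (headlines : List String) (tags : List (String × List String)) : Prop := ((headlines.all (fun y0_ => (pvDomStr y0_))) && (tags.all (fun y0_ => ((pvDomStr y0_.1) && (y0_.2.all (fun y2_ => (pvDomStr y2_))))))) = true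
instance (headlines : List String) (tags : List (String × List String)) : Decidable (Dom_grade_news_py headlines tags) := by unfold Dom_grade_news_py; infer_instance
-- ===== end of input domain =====

-- B replaces A's tag-by-tag substring searches by a text-driven scan: one pass over the
-- text positions with a prefix test and a min-priority-rank accumulator; same cost class.


-- ===== PORT A =====
-- A: four sequential priority-group loops, each returning on the first matching tag ('t in txt').
def grade_news_py (headlines : List String) (tags : List (String × List String)) : List (String × String) :=
  let txt := PySem.Str.lower (PySem.Str.join " " headlines)
  match ((PySem.Dict.mk tags).getD "C" []).find? (fun t => PySem.Str.isIn t txt) with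
  | some t => [("grade", "C"), ("hit", t)]
  | none =>
  match ((PySem.Dict.mk tags).getD "B" []).find? (fun t => PySem.Str.isIn t txt) with
  | some t => [("grade", "B"), ("hit", t)]
  | none =>
  match ((PySem.Dict.mk tags).getD "A" []).find? (fun t => PySem.Str.isIn t txt) with
  | some t => [("grade", "A"), ("hit", t)]
  | none =>
  match ((PySem.Dict.mk tags).getD "A_plus" []).find? (fun t => PySem.Str.isIn t txt) with
  | some t => [("grade", "A+"), ("hit", t)]
  | none =>
    if headlines = [] then [("grade", "A+"), ("hit", "no news")]
    else [("grade", "A"), ("hit", "neutral")]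

-- ===== PORT B =====
def pvPriority : List (String × String) := [("C", "C"), ("B", "B"), ("A", "A"), ("A_plus", "A+")]

-- the body of Source B's 'if m is not None and (best is None or r < best[0]): best = m'
def pvMerge {α : Type} (r b : Option (Int × α)) : Option (Int × α) :=
  match r with
  | some m => if b.elim true (fun e => m.1 < e.1) then some m else b
  | none => b

-- B: one walk over the text positions 0..len(txt); at each position the first tag starting
-- there (inner loop with break = find?), kept if its priority rank beats the best so far.
-- txt.startswith(t, i) for 0 ≤ i ≤ len(txt) is exactly 't is a prefix of txt[i:]',
-- ported as PySem.Chars.startswith on (txt.toList.drop i); range(len+1) over Nat is exact.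
def grade_news_py_alt (headlines : List String) (tags : List (String × List String)) : List (String × String) :=
  let txt := PySem.Str.lower (PySem.Str.join " " headlines)
  let candidates := pvPriority.flatMap (fun kg => ((PySem.Dict.mk tags).getD kg.1 []).map (fun t => (kg.2, t)))
  let cs := txt.toList
  let best := (List.range (cs.length + 1)).foldl (fun b i =>
      pvMerge ((PySem.List.enumerate candidates 0).find?
        (fun rt => PySem.Chars.startswith (cs.drop i) rt.2.2.toList)) b) none
  match best with
  | some m => [("grade", m.2.1), ("hit", m.2.2)]
  | none =>
    if headlines = [] then [("grade", "A+"), ("hit", "no news")]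
    else [("grade", "A"), ("hit", "neutral")]

-- ===== PRECONDITION & SPEC =====
def Spec_grade_news_py (headlines : List String) (tags : List (String × List String)) (out : List (String × String)) : Prop := out = grade_news_py_alt headlines tags
instance (headlines : List String) (tags : List (String × List String)) (out : List (String × String)) : Decidable (Spec_grade_news_py headlines tags out) := by unfold Spec_grade_news_py; infer_instance

-- ===== CLAIM (what is proved, stated in full; the proofs are below) =====
def Claim_equal_grade_news_py : Prop := ∀ (headlines : List String) (tags : List (String × List String)), Dom_grade_news_py headlines tags → Spec_grade_news_py headlines tags (grade_news_py headlines tags)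

-- ===== LEMMAS AND PROOFS =====

-- Merging the first match at one position into the running min-rank best equals a
-- first-match under the disjunction, for rank-increasing lists.
theorem pv_combine {α : Type} (es : List (Int × α)) (hp : es.Pairwise (fun p q => p.1 < q.1))
    (p q : (Int × α) → Bool) :
    pvMerge (es.find? q) (es.find? p) = es.find? (fun rt => p rt || q rt) := by
  unfold pvMerge
  induction es with
  | nil => simp
  | cons e es ih =>
    have hlt : ∀ x ∈ es, e.1 < x.1 := (List.pairwise_cons.mp hp).1
    have hp' := (List.pairwise_cons.mp hp).2
    by_cases hpe : p e = true
    · by_cases hqe : q e = true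
      · simp [hpe, hqe]
      · simp only [List.find?_cons, hpe, hqe]
        rcases hq : es.find? q with _ | m
        · simp
        · have hm : e.1 < m.1 := hlt m (List.mem_of_find?_eq_some hq)
          simp [not_lt.mpr (le_of_lt hm)]
    · by_cases hqe : q e = true
      · simp only [List.find?_cons, hpe, hqe]
        rcases hpf : es.find? p with _ | x
        · simp
        · have hx : e.1 < x.1 := hlt x (List.mem_of_find?_eq_some hpf)
          simp [hx]
      · simpa [List.find?_cons, hpe, hqe] using ih hp'

-- The position fold computes the first (min-rank) element matched at some position < k.
theorem pv_fold_range {α : Type} (es : List (Int × α)) (hp : es.Pairwise (fun p q => p.1 < q.1))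
    (Q : Nat → (Int × α) → Bool) (k : Nat) :
    (List.range k).foldl (fun b i => pvMerge (es.find? (Q i)) b) none
      = es.find? (fun rt => (List.range k).any (fun i => Q i rt)) := by
  induction k with
  | zero =>
    simp only [List.range_zero, List.foldl_nil, List.any_nil]
    exact (List.find?_eq_none.mpr (by simp)).symm
  | succ k ih =>
    rw [List.range_succ, List.foldl_append, List.foldl_cons, List.foldl_nil, ih]
    have := pv_combine es hp (fun rt => (List.range k).any (fun i => Q i rt)) (Q k)
    rw [this]
    congr 1
    funext rt
    simp [List.any_append]

-- "t starts at some position 0..len" is exactly "t in txt".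
theorem pv_any_startswith (cs sub : List Char) :
    (List.range (cs.length + 1)).any (fun i => PySem.Chars.startswith (cs.drop i) sub)
      = PySem.Chars.isIn sub cs := by
  by_cases h : PySem.Chars.isIn sub cs = true
  · rw [h, List.any_eq_true]
    obtain ⟨j, hj⟩ := (PySem.Chars.exists_prefix_drop_iff_isIn sub cs).mpr h
    refine ⟨min j cs.length, by simp only [List.mem_range]; omega, ?_⟩
    rw [PySem.Chars.startswith_iff]
    rcases Nat.le_total j cs.length with hle | hge
    · simpa [min_eq_left hle] using hj
    · have hnil : cs.drop j = [] := List.drop_eq_nil_of_le hge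
      have hsub : sub = [] := List.prefix_nil.mp (hnil ▸ hj)
      simp [hsub]
  · rw [eq_false_of_ne_true h, List.any_eq_false]
    intro i _ hsw
    exact h ((PySem.Chars.exists_prefix_drop_iff_isIn sub cs).mp
      ⟨i, (PySem.Chars.startswith_iff _ _).mp hsw⟩)

-- Dropping the enumeration indices commutes with find? on a snd-only predicate.
theorem pv_find_enumerate {α : Type} (xs : List α) (s : Int) (p : α → Bool) :
    ((PySem.List.enumerate xs s).find? (fun rt => p rt.2)).map (·.2) = xs.find? p := by
  induction xs generalizing s with
  | nil => simp [PySem.List.enumerate_nil]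
  | cons x xs ih =>
    rw [PySem.List.enumerate_cons, List.find?_cons, List.find?_cons]
    by_cases hx : p x = true <;> simp [hx, ih]

theorem find?_flatMap_group {α β : Type} (p : β → Bool) (f : α → List β) (x : α) (xs : List α) :
    ((x :: xs).flatMap f).find? p = (((f x).find? p).or ((xs.flatMap f).find? p)) := by
  simp [List.flatMap_cons, List.find?_append]

theorem grade_news_py_spec : Claim_equal_grade_news_py := by
  intro headlines tags _
  unfold Spec_grade_news_py
  simp only [grade_news_py, grade_news_py_alt]
  -- Reduce B's position fold to a single find? over the flattened candidate list.
  rw [pv_fold_range _ (PySem.List.pairwise_lt_enumerate _ _) _ _]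
  have hpred : (fun rt : Int × String × String =>
      (List.range ((PySem.Str.lower (PySem.Str.join " " headlines)).toList.length + 1)).any
        (fun i => PySem.Chars.startswith ((PySem.Str.lower (PySem.Str.join " " headlines)).toList.drop i) rt.2.2.toList))
      = (fun rt : Int × String × String => PySem.Str.isIn rt.2.2 (PySem.Str.lower (PySem.Str.join " " headlines))) := by
    funext rt
    rw [pv_any_startswith]
    simp [PySem.Str.isIn_eq]
  rw [hpred]
  have hfe := pv_find_enumerate
    (pvPriority.flatMap (fun kg => ((PySem.Dict.mk tags).getD kg.1 []).map (fun t => (kg.2, t)))) 0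
    (fun gt : String × String => PySem.Str.isIn gt.2 (PySem.Str.lower (PySem.Str.join " " headlines)))
  -- Case on the plain find?; transfer to the enumerated one via hfe.
  rcases hF : (pvPriority.flatMap (fun kg => ((PySem.Dict.mk tags).getD kg.1 []).map (fun t => (kg.2, t)))).find?
      (fun gt => PySem.Str.isIn gt.2 (PySem.Str.lower (PySem.Str.join " " headlines))) with _ | gt
  all_goals rw [hF] at hfe
  · have hE : (PySem.List.enumerate (pvPriority.flatMap (fun kg => ((PySem.Dict.mk tags).getD kg.1 []).map (fun t => (kg.2, t)))) 0).find?
        (fun rt => PySem.Str.isIn rt.2.2 (PySem.Str.lower (PySem.Str.join " " headlines))) = none := by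
      rcases hE' : _root_.List.find? _ _ with _ | m
      · rfl
      · rw [hE'] at hfe; simp at hfe
    rw [hE]
    -- A side: all four groups fail, fallback branch.
    rw [show (pvPriority.flatMap (fun kg => ((PySem.Dict.mk tags).getD kg.1 []).map (fun t => (kg.2, t)))) =
      _ from rfl] at hF
    simp only [pvPriority, find?_flatMap_group, List.flatMap_nil, List.find?_nil, List.find?_map,
      Option.or_eq_none_iff, Function.comp_def] at hF
    obtain ⟨h1, h2, h3, h4, -⟩ := hF
    rw [Option.map_eq_none_iff] at h1 h2 h3 h4
    simp only [h1, h2, h3, h4]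
  · rcases hE' : (PySem.List.enumerate (pvPriority.flatMap (fun kg => ((PySem.Dict.mk tags).getD kg.1 []).map (fun t => (kg.2, t)))) 0).find?
        (fun rt => PySem.Str.isIn rt.2.2 (PySem.Str.lower (PySem.Str.join " " headlines))) with _ | m
    · rw [hE'] at hfe; simp at hfe
    · rw [hE'] at hfe
      simp only [Option.map_some] at hfe
      rw [hE']
      -- A side: chase the first-match through the four groups.
      simp only [pvPriority, find?_flatMap_group, List.flatMap_nil, List.find?_nil, List.find?_map,
        Function.comp_def, Option.or_none] at hF
      rcases h1 : List.find? (fun t => PySem.Str.isIn t (PySem.Str.lower (PySem.Str.join " " headlines))) ((PySem.Dict.mk tags).getD "C" []) with _ | t1 <;>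
        rcases h2 : List.find? (fun t => PySem.Str.isIn t (PySem.Str.lower (PySem.Str.join " " headlines))) ((PySem.Dict.mk tags).getD "B" []) with _ | t2 <;>
        rcases h3 : List.find? (fun t => PySem.Str.isIn t (PySem.Str.lower (PySem.Str.join " " headlines))) ((PySem.Dict.mk tags).getD "A" []) with _ | t3 <;>
        rcases h4 : List.find? (fun t => PySem.Str.isIn t (PySem.Str.lower (PySem.Str.join " " headlines))) ((PySem.Dict.mk tags).getD "A_plus" []) with _ | t4 <;>
        rw [h1, h2, h3, h4] at hF <;> simp_all
      all_goals exact ⟨congrArg Prod.fst hF, congrArg Prod.snd hF⟩
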